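-- pv_equiv track=rewrite | github.com/sgl-project/sglang | sgl-kernel/tests/test_sparse_attention_cache.py | _eviction_order
-- ===== SOURCE A (Python) =====
-- WARP_SIZE = 32
--
-- def _eviction_order(hot_buffer_size: int, last_evicted_slot: int) -> list[int]:
--     num_buffer_chunks = (hot_buffer_size + WARP_SIZE - 1) // WARP_SIZE
--     physical_chunk_offset = (last_evicted_slot + WARP_SIZE - 1) // WARP_SIZE
--     order: list[int] = []
--     for chunk_idx in range(num_buffer_chunks):
--         physical_chunk_idx = (chunk_idx + physical_chunk_offset) % num_buffer_chunks
--         base = physical_chunk_idx * WARP_SIZE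
--         for lane_id in range(WARP_SIZE):
--             slot = base + lane_id
--             if slot < hot_buffer_size:
--                 order.append(slot)
--     return order
-- ===== SOURCE B (Python) =====
-- WARP_SIZE = 32
--
-- def _eviction_order(hot_buffer_size: int, last_evicted_slot: int) -> list[int]:
--     num_buffer_chunks = (hot_buffer_size + WARP_SIZE - 1) // WARP_SIZE
--     if num_buffer_chunks <= 0:
--         return []
--     valid = list(range(hot_buffer_size))
--     chunks = [valid[i:i + WARP_SIZE] for i in range(0, hot_buffer_size, WARP_SIZE)]
--     k = ((last_evicted_slot + WARP_SIZE - 1) // WARP_SIZE) % num_buffer_chunks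
--     order: list[int] = []
--     for chunk in chunks[k:] + chunks[:k]:
--         order.extend(chunk)
--     return order
-- ===== Notes on version B (the rewrite author's own statement) =====
-- stated objective: alternative
-- what changed: Replaces the nested chunk/lane loops with per-element modular index arithmetic and a bounds check by building range(hot_buffer_size), splitting it into WARP_SIZE-slot chunks (slicing naturally shortens the last chunk), and rotating the chunk list once by offset % num_buffer_chunks before flattening.
import Mathlib
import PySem

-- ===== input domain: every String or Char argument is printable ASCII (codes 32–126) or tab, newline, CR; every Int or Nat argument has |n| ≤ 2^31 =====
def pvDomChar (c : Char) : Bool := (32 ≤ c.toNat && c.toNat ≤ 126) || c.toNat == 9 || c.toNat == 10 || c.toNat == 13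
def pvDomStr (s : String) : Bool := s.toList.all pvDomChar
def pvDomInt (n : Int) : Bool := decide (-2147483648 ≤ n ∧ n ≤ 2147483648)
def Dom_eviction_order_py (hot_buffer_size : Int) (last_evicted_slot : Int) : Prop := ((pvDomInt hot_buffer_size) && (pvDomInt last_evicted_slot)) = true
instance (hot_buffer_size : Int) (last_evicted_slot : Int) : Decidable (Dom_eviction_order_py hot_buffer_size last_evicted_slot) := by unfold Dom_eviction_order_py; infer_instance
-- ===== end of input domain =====

-- B rebuilds the same eviction order by chunking range(hot_buffer_size) into WARP_SIZE-slot chunks and rotating the chunk list; alternative decomposition, no speed claim.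

-- ===== PORT A =====
def eviction_order_py (hot_buffer_size : Int) (last_evicted_slot : Int) : List Int :=
  let num_buffer_chunks := PySem.Int.floordiv (hot_buffer_size + 32 - 1) 32
  let physical_chunk_offset := PySem.Int.floordiv (last_evicted_slot + 32 - 1) 32
  (PySem.List.pyRange 0 num_buffer_chunks 1).foldl (fun order chunk_idx =>
    let physical_chunk_idx := PySem.Int.mod (chunk_idx + physical_chunk_offset) num_buffer_chunks
    let base := physical_chunk_idx * 32
    (PySem.List.pyRange 0 32 1).foldl (fun order lane_id =>
      let slot := base + lane_id
      if slot < hot_buffer_size then order ++ [slot] else order) order) []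

-- ===== PORT B =====
def eviction_order_py_alt (hot_buffer_size : Int) (last_evicted_slot : Int) : List Int :=
  let num_buffer_chunks := PySem.Int.floordiv (hot_buffer_size + 32 - 1) 32
  if num_buffer_chunks ≤ 0 then []
  else
    let valid := PySem.List.pyRange 0 hot_buffer_size 1
    let chunks := (PySem.List.pyRange 0 hot_buffer_size 32).map
      (fun i => PySem.List.slice valid (some i) (some (i + 32)))
    let k := PySem.Int.mod (PySem.Int.floordiv (last_evicted_slot + 32 - 1) 32) num_buffer_chunks
    (PySem.List.slice chunks (some k) none ++ PySem.List.slice chunks none (some k)).foldl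
      (fun order chunk => order ++ chunk) []

-- ===== PRECONDITION & SPEC =====
def Spec_eviction_order_py (hot_buffer_size : Int) (last_evicted_slot : Int) (out : List Int) : Prop := out = eviction_order_py_alt hot_buffer_size last_evicted_slot
instance (hot_buffer_size : Int) (last_evicted_slot : Int) (out : List Int) : Decidable (Spec_eviction_order_py hot_buffer_size last_evicted_slot out) := by unfold Spec_eviction_order_py; infer_instance

-- ===== CLAIM (what is proved, stated in full; the proofs are below) =====
def Claim_equal_eviction_order_py : Prop := ∀ (hot_buffer_size : Int) (last_evicted_slot : Int), Dom_eviction_order_py hot_buffer_size last_evicted_slot → Spec_eviction_order_py hot_buffer_size last_evicted_slot (eviction_order_py hot_buffer_size last_evicted_slot)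

-- ===== LEMMAS AND PROOFS =====

/-- The slots of physical chunk `p`: `[p*32, min (p*32+32) hbs)`. -/
def pvChunk (hbs : Int) (p : Int) : List Int :=
  PySem.List.pyRange (p*32) (min (p*32+32) hbs) 1

/-- `pvChunk` at a natural chunk index. -/
def pvC (hbs : Int) (m : Nat) : List Int := pvChunk hbs (m : Int)

/-- A's inner lane loop appends exactly the slots of the chunk starting at `base`. -/
lemma pv_inner (hbs base : Int) (acc : List Int) (_h0 : 0 ≤ base) (h1 : base < hbs) :
    (PySem.List.pyRange 0 32 1).foldl (fun order lane_id =>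
      if base + lane_id < hbs then order ++ [base + lane_id] else order) acc
    = acc ++ PySem.List.pyRange base (min (base+32) hbs) 1 := by
  have hfi := PySem.List.foldl_append_if (fun lane => decide (base + lane < hbs))
      (fun lane => base + lane) (PySem.List.pyRange 0 32 1) acc
  simp only [decide_eq_true_eq] at hfi
  rw [hfi]
  congr 1
  have hm1 : (0:Int) ≤ min 32 (hbs - base) := by omega
  have hm2 : min 32 (hbs - base) ≤ 32 := by omega
  rw [PySem.List.pyRange_one_append 0 (min 32 (hbs - base)) 32 hm1 hm2, List.filter_append]
  have hf1 : (PySem.List.pyRange 0 (min 32 (hbs - base)) 1).filter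
      (fun lane => decide (base + lane < hbs)) = PySem.List.pyRange 0 (min 32 (hbs - base)) 1 := by
    apply List.filter_eq_self.mpr
    intro x hx
    rw [PySem.List.mem_pyRange_one] at hx
    simp only [decide_eq_true_eq]
    omega
  have hf2 : (PySem.List.pyRange (min 32 (hbs - base)) 32 1).filter
      (fun lane => decide (base + lane < hbs)) = [] := by
    apply List.filter_eq_nil_iff.mpr
    intro x hx
    rw [PySem.List.mem_pyRange_one] at hx
    simp only [decide_eq_true_eq]
    omega
  rw [hf1, hf2, List.append_nil]
  rw [PySem.List.pyRange_one, PySem.List.pyRange_one, List.map_map]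
  have harg : (min 32 (hbs - base) - 0).toNat = (min (base+32) hbs - base).toNat := by omega
  rw [harg]
  apply List.map_congr_left
  intro x _
  simp

/-- A's whole loop as a flatMap of chunks over the rotated physical indices. -/
lemma pvA_eq (hbs n off : Int) (hn0 : 0 < n) (hn2 : n*32 ≤ hbs + 31) :
    (PySem.List.pyRange 0 n 1).foldl (fun order chunk_idx =>
      (PySem.List.pyRange 0 32 1).foldl (fun order lane_id =>
        if (PySem.Int.mod (chunk_idx + off) n) * 32 + lane_id < hbs then
          order ++ [(PySem.Int.mod (chunk_idx + off) n) * 32 + lane_id]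
        else order) order) []
    = (PySem.List.pyRange 0 n 1).flatMap (fun i => pvChunk hbs ((i + off) % n)) := by
  rw [PySem.List.foldl_congr_mem _ _ (fun acc i => acc ++ pvChunk hbs ((i + off) % n)) []
    ?_]
  · rw [PySem.List.foldl_append_eq_flatMap]
    simp
  · intro acc i _
    rw [PySem.Int.mod_eq_emod_of_pos hn0]
    have hp0 : 0 ≤ (i + off) % n := Int.emod_nonneg _ (by omega)
    have hp1 : (i + off) % n < n := Int.emod_lt_of_pos _ hn0
    have hb : ((i + off) % n) * 32 < hbs := by
      have := mul_le_mul_of_nonneg_right (show (i + off) % n ≤ n - 1 by omega)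
        (show (0:Int) ≤ 32 by norm_num)
      nlinarith
    have := pv_inner hbs (((i + off) % n) * 32) acc (by positivity) hb
    rw [this]
    rfl

/-- Rotating the index list: mapping `(· + K) % N` over `range N` is `drop K ++ take K`. -/
lemma pv_map_rot (N K : Nat) (hK : K < N) :
    (List.range N).map (fun j => (j + K) % N)
    = (List.range N).drop K ++ (List.range N).take K := by
  apply List.ext_getElem
  · simp
    omega
  · intro i h1 h2
    have hiN : i < N := by simpa using h1
    simp only [List.getElem_map, List.getElem_range]
    by_cases hi : i < N - K
    · rw [List.getElem_append_left (by simp; omega)]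
      simp only [List.getElem_drop, List.getElem_range]
      rw [Nat.mod_eq_of_lt (by omega)]
      omega
    · rw [List.getElem_append_right (by simp; omega)]
      simp only [List.getElem_take, List.getElem_range, List.length_drop, List.length_range]
      rw [Nat.mod_eq_sub_mod (by omega), Nat.mod_eq_of_lt (by omega)]
      omega

/-- B's slice of `range(hbs)` at chunk `j` is exactly chunk `j`. -/
lemma pv_chunk_slice (hbs : Int) (hpos : 0 < hbs) (j : Nat) (hb : 32*(j:Int) < hbs) :
    PySem.List.slice (PySem.List.pyRange 0 hbs 1)
      (some (0 + 32*(j:Int))) (some (0 + 32*(j:Int) + 32)) = pvC hbs j := by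
  have h1 : (0 + 32*(j:Int)) = ((32*j : Nat) : Int) := by push_cast; ring
  have h2 : ((32*j : Nat) : Int) + 32 = ((32*j + 32 : Nat) : Int) := by push_cast; ring
  rw [h1, h2, PySem.List.slice_natCast]
  apply List.ext_getElem
  · simp [PySem.List.length_pyRange_one, pvC, pvChunk]
    omega
  · intro i hi1 hi2
    simp only [List.getElem_take, List.getElem_drop, pvC, pvChunk,
      PySem.List.getElem_pyRange_one]
    push_cast
    ring

/-- B's chunk list is `pvC` over `range N`. -/
lemma pv_chunks (hbs : Int) (hpos : 0 < hbs) :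
    (PySem.List.pyRange 0 hbs 32).map
      (fun i => PySem.List.slice (PySem.List.pyRange 0 hbs 1) (some i) (some (i + 32)))
    = (List.range (PySem.Int.floordiv (hbs + 32 - 1) 32).toNat).map (pvC hbs) := by
  have hn2 : (PySem.Int.floordiv (hbs + 32 - 1) 32) * 32 ≤ hbs + 32 - 1 :=
    (PySem.Int.le_floordiv_iff_mul_le (by norm_num)).mp le_rfl
  rw [PySem.List.pyRange_of_pos _ _ (by norm_num : (0:Int) < 32), if_pos hpos, List.map_map]
  have hM : ((hbs - 0 + 32 - 1) / 32).toNat = (PySem.Int.floordiv (hbs + 32 - 1) 32).toNat := by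
    rw [PySem.Int.floordiv_eq_ediv_of_pos (by norm_num)]
    congr 1
    ring_nf
  rw [hM]
  apply List.map_congr_left
  intro j hj
  rw [List.mem_range] at hj
  have hb : 32*(j:Int) < hbs := by
    have : (j:Int) ≤ PySem.Int.floordiv (hbs + 32 - 1) 32 - 1 := by omega
    nlinarith
  simpa using pv_chunk_slice hbs hpos j hb

-- ===== VERDICT (by name: the statement is the Claim_ definition above) =====
theorem eviction_order_py_spec : Claim_equal_eviction_order_py := by
  intro hbs les _
  unfold Spec_eviction_order_py
  by_cases hpos : 0 < hbs
  · -- positive buffer size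
    have hn0 : 0 < PySem.Int.floordiv (hbs + 32 - 1) 32 :=
      (PySem.Int.le_floordiv_iff_mul_le (by norm_num)).mpr (by omega)
    have hn2 : (PySem.Int.floordiv (hbs + 32 - 1) 32) * 32 ≤ hbs + 32 - 1 :=
      (PySem.Int.le_floordiv_iff_mul_le (by norm_num)).mp le_rfl
    set n := PySem.Int.floordiv (hbs + 32 - 1) 32 with hn_def
    set off := PySem.Int.floordiv (les + 32 - 1) 32 with hoff_def
    have hk0 : 0 ≤ off % n := Int.emod_nonneg _ (by omega)
    have hk1 : off % n < n := Int.emod_lt_of_pos _ hn0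
    set N := n.toNat with hN_def
    set K := (off % n).toNat with hK_def
    have hKN : K < N := by omega
    have hNn : ((N:Nat):Int) = n := Int.toNat_of_nonneg hn0.le
    have hKk : ((K:Nat):Int) = off % n := Int.toNat_of_nonneg hk0
    -- A side
    have hA : eviction_order_py hbs les
        = ((List.range N).map (fun j => (j + K) % N)).flatMap (pvC hbs) := by
      have h1 : eviction_order_py hbs les
          = (PySem.List.pyRange 0 n 1).flatMap (fun i => pvChunk hbs ((i + off) % n)) :=
        pvA_eq hbs n off hn0 (by omega)
      rw [h1, PySem.List.pyRange_one]
      simp only [Int.sub_zero, zero_add]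
      rw [List.flatMap_map, ← hN_def]
      rw [List.flatMap_map (fun j => (j + K) % N) (pvC hbs) (List.range N)]
      apply List.flatMap_congr
      intro j hj
      rw [List.mem_range] at hj
      have hjlt : (j:Int) < n := by omega
      have : ((j:Int) + off) % n = (((j + K) % N : Nat) : Int) := by
        rw [Int.add_emod, Int.emod_eq_of_lt (by positivity) hjlt]
        rw [← hKk, ← hNn, Int.natCast_mod]
        norm_cast
      rw [pvC, pvChunk, pvChunk, this]
    -- B side
    have hB : eviction_order_py_alt hbs les
        = ((List.range N).drop K ++ (List.range N).take K).flatMap (pvC hbs) := by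
      simp only [eviction_order_py_alt]
      rw [← hn_def, ← hoff_def, if_neg (by omega)]
      rw [PySem.Int.mod_eq_emod_of_pos hn0]
      have hfl := PySem.List.foldl_append_eq_flatMap (fun c : List Int => c)
        (PySem.List.slice ((PySem.List.pyRange 0 hbs 32).map
            (fun i => PySem.List.slice (PySem.List.pyRange 0 hbs 1) (some i) (some (i + 32))))
            (some (off % n)) none
         ++ PySem.List.slice ((PySem.List.pyRange 0 hbs 32).map
            (fun i => PySem.List.slice (PySem.List.pyRange 0 hbs 1) (some i) (some (i + 32))))
            none (some (off % n))) []
      simp only [] at hfl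
      rw [hfl]
      rw [pv_chunks hbs hpos, ← hn_def]
      rw [PySem.List.slice_from _ hk0, PySem.List.slice_to _ hk0]
      rw [← hK_def, ← hN_def]
      rw [← List.map_drop, ← List.map_take, ← List.map_append, List.flatMap_map]
      simp
    rw [hA, hB, pv_map_rot N K hKN]
  · -- hbs ≤ 0: both sides are []
    have hn : PySem.Int.floordiv (hbs + 32 - 1) 32 < 1 :=
      (PySem.Int.floordiv_lt_iff_lt_mul (by norm_num)).mpr (by omega)
    simp only [eviction_order_py, eviction_order_py_alt]
    rw [PySem.List.pyRange_one_eq_nil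
      (show PySem.Int.floordiv (hbs + 32 - 1) 32 ≤ 0 by omega)]
    rw [if_pos (show PySem.Int.floordiv (hbs + 32 - 1) 32 ≤ 0 by omega)]
    rfl
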